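-- pv_equiv track=rewrite | github.com/BrianMills2718/kgas | tests/archived_experimental/stress/test_compatibility_validation.py | _generate_phase_recommendations
-- ===== SOURCE A (Python) =====
-- from typing import Dict, List, Any, Optional, Tuple
--
-- def _generate_phase_recommendations(issues: List[str]) -> List[str]:
--     recommendations = []
--     if any("missing" in issue.lower() for issue in issues):
--         recommendations.append("Implement missing interface methods in phase adapters")
--     if any("request format" in issue.lower() for issue in issues):
--         recommendations.append("Standardize request format across all phases")
--     if any("capabilities" in issue.lower() for issue in issues):
--         recommendations.append("Add required capability fields to all phase adapters")
--     return recommendations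
-- ===== SOURCE B (Python) =====
-- def _generate_phase_recommendations(issues):
--     has_missing = has_format = has_caps = False
--     for issue in issues:
--         low = issue.lower()
--         if "missing" in low:
--             has_missing = True
--         if "request format" in low:
--             has_format = True
--         if "capabilities" in low:
--             has_caps = True
--     out = []
--     if has_missing:
--         out.append("Implement missing interface methods in phase adapters")
--     if has_format:
--         out.append("Standardize request format across all phases")
--     if has_caps:
--         out.append("Add required capability fields to all phase adapters")
--     return out
-- ===== Notes on version B (the rewrite author's own statement) =====
-- stated objective: simpler
-- what changed: Replaces three separate any() scans (each lowering every issue again) with a single pass that lowers each issue once and sets three flags, then emits the recommendations in the fixed order.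
import Mathlib
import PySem

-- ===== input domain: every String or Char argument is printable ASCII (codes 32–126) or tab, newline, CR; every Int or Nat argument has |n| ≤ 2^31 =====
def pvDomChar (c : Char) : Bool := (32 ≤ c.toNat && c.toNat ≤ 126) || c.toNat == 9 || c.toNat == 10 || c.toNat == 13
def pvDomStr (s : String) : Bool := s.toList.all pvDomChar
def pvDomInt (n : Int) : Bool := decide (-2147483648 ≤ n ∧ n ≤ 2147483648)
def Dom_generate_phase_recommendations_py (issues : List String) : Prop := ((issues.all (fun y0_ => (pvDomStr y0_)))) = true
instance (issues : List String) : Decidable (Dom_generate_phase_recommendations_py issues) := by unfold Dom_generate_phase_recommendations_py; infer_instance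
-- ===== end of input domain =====

-- B replaces A's three separate any() scans (each lowering every issue again) with one
-- pass that lowers each issue once and sets three flags; objective: simpler.

-- ===== PORT A =====
def generate_phase_recommendations_py (issues : List String) : List String :=
  let recommendations : List String := []
  let recommendations :=
    if issues.any (fun issue => PySem.Str.isIn "missing" (PySem.Str.lower issue)) then
      recommendations ++ ["Implement missing interface methods in phase adapters"]
    else recommendations
  let recommendations :=
    if issues.any (fun issue => PySem.Str.isIn "request format" (PySem.Str.lower issue)) then
      recommendations ++ ["Standardize request format across all phases"]
    else recommendations
  let recommendations :=
    if issues.any (fun issue => PySem.Str.isIn "capabilities" (PySem.Str.lower issue)) then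
      recommendations ++ ["Add required capability fields to all phase adapters"]
    else recommendations
  recommendations

-- ===== PORT B =====
def generate_phase_recommendations_py_alt (issues : List String) : List String :=
  let flags := issues.foldl
    (fun (f : Bool × Bool × Bool) issue =>
      let low := PySem.Str.lower issue
      (f.1 || PySem.Str.isIn "missing" low,
       f.2.1 || PySem.Str.isIn "request format" low,
       f.2.2 || PySem.Str.isIn "capabilities" low))
    (false, false, false)
  (if flags.1 then ["Implement missing interface methods in phase adapters"] else []) ++
  (if flags.2.1 then ["Standardize request format across all phases"] else []) ++
  (if flags.2.2 then ["Add required capability fields to all phase adapters"] else [])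

-- ===== PRECONDITION & SPEC =====
def Spec_generate_phase_recommendations_py (issues : List String) (out : List String) : Prop := out = generate_phase_recommendations_py_alt issues
instance (issues : List String) (out : List String) : Decidable (Spec_generate_phase_recommendations_py issues out) := by unfold Spec_generate_phase_recommendations_py; infer_instance

-- ===== CLAIM (what is proved, stated in full; the proofs are below) =====
def Claim_equal_generate_phase_recommendations_py : Prop := ∀ (issues : List String), Dom_generate_phase_recommendations_py issues → Spec_generate_phase_recommendations_py issues (generate_phase_recommendations_py issues)

-- ===== LEMMAS AND PROOFS =====

-- the B-side fold computes exactly the three any-predicates of A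
theorem flags_eq (issues : List String) (m r c : Bool) :
    issues.foldl
      (fun (f : Bool × Bool × Bool) issue =>
        let low := PySem.Str.lower issue
        (f.1 || PySem.Str.isIn "missing" low,
         f.2.1 || PySem.Str.isIn "request format" low,
         f.2.2 || PySem.Str.isIn "capabilities" low))
      (m, r, c)
    = (m || issues.any (fun issue => PySem.Str.isIn "missing" (PySem.Str.lower issue)),
       r || issues.any (fun issue => PySem.Str.isIn "request format" (PySem.Str.lower issue)),
       c || issues.any (fun issue => PySem.Str.isIn "capabilities" (PySem.Str.lower issue))) := by
  induction issues generalizing m r c with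
  | nil => simp
  | cons h t ih =>
      simp only [List.foldl_cons, List.any_cons, ih]
      simp [Bool.or_assoc]

-- ===== VERDICT (by name: the statement is the Claim_ definition above) =====
theorem generate_phase_recommendations_py_spec : Claim_equal_generate_phase_recommendations_py := by
  intro issues _
  show generate_phase_recommendations_py issues = generate_phase_recommendations_py_alt issues
  unfold generate_phase_recommendations_py generate_phase_recommendations_py_alt
  simp only [flags_eq, Bool.false_or]
  split_ifs <;> simp_all
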